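-- pv_equiv track=rewrite | github.com/ADJsBuilds/SmartWalker | backend/app/services/voice_actions.py | parse_confirmation
-- ===== SOURCE A (Python) =====
-- def _normalize_text(value: str) -> str:
--     return ' '.join(str(value or '').strip().lower().split())
--
-- def parse_confirmation(value: str) -> str:
--     text = _normalize_text(value)
--     if not text:
--         return 'unknown'
--     positive = (
--         'yes',
--         'yeah',
--         'yep',
--         'confirm',
--         'do it',
--         'go ahead',
--         'send it',
--         'please send',
--         'ok send',
--         'okay send',
--         'sure',
--     )
--     negative = (
--         'no',
--         'nope',
--         'cancel',
--         'stop',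
--         'dont',
--         "don't",
--         'do not',
--         'never mind',
--         'not now',
--     )
--     if any(text == token or text.startswith(f'{token} ') for token in positive):
--         return 'confirm'
--     if any(text == token or text.startswith(f'{token} ') for token in negative):
--         return 'deny'
--     return 'unknown'
-- ===== SOURCE B (Python) =====
-- POSITIVE = frozenset({
--     'yes', 'yeah', 'yep', 'confirm', 'do it', 'go ahead', 'send it',
--     'please send', 'ok send', 'okay send', 'sure',
-- })
-- NEGATIVE = frozenset({
--     'no', 'nope', 'cancel', 'stop', 'dont', "don't", 'do not',
--     'never mind', 'not now',
-- })
--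
-- def parse_confirmation(value: str) -> str:
--     words = str(value or '').strip().lower().split()
--     if not words:
--         return 'unknown'
--     prefixes = {' '.join(words[:i]) for i in range(1, len(words) + 1)}
--     if prefixes & POSITIVE:
--         return 'confirm'
--     if prefixes & NEGATIVE:
--         return 'deny'
--     return 'unknown'
-- ===== Notes on version B (the rewrite author's own statement) =====
-- stated objective: idiomatic
-- what changed: B splits the normalized text into words once and tests the set of word-boundary prefix joins against frozensets of positive/negative tokens, instead of A's two any(...) scans over token tuples doing text == token / text.startswith checks.
import Mathlib
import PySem

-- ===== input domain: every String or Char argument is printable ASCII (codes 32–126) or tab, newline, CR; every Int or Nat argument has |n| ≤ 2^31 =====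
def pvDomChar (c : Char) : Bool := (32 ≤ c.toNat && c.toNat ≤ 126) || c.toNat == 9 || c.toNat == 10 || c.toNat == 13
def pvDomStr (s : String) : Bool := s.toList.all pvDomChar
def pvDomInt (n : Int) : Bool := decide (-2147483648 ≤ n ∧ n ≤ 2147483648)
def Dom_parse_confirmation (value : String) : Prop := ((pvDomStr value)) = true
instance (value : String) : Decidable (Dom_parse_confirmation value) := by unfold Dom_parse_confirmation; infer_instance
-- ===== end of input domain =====

-- B replaces A's two any(...) token scans (text == token / text.startswith(token + ' '))
-- by building the set of word-boundary prefixes of the normalized text once and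
-- intersecting it with frozensets of the positive/negative tokens (objective: idiomatic).

-- ===== PORT A =====
def pvNormalizeText (value : String) : String :=
  PySem.Str.join " " (PySem.Str.split₀ (PySem.Str.lower (PySem.Str.strip value)))

def pvPositiveA : List String :=
  ["yes", "yeah", "yep", "confirm", "do it", "go ahead", "send it",
   "please send", "ok send", "okay send", "sure"]

def pvNegativeA : List String :=
  ["no", "nope", "cancel", "stop", "dont", "don't", "do not", "never mind", "not now"]

def parse_confirmation (value : String) : String :=
  let text := pvNormalizeText value
  if text == "" then "unknown"
  else if pvPositiveA.any (fun token => text == token || PySem.Str.startswith text (token ++ " ")) then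
    "confirm"
  else if pvNegativeA.any (fun token => text == token || PySem.Str.startswith text (token ++ " ")) then
    "deny"
  else "unknown"


-- ===== PORT B =====
-- 'if prefixes & POSITIVE:' (set truthiness) is ported as 'len(prefixes & POSITIVE) ≠ 0' — exact as sets.
def pvPOSITIVE : PySem.Set String :=
  PySem.Set.ofList ["yes", "yeah", "yep", "confirm", "do it", "go ahead", "send it",
                    "please send", "ok send", "okay send", "sure"]

def pvNEGATIVE : PySem.Set String :=
  PySem.Set.ofList ["no", "nope", "cancel", "stop", "dont", "don't", "do not",
                    "never mind", "not now"]

def parse_confirmation_alt (value : String) : String :=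
  let words := PySem.Str.split₀ (PySem.Str.lower (PySem.Str.strip value))
  if words.isEmpty then "unknown"
  else
    let prefixes : PySem.Set String :=
      PySem.Set.ofList ((PySem.List.pyRange 1 ((words.length : Int) + 1) 1).map
        (fun i => PySem.Str.join " " (PySem.List.slice words none (some i))))
    if PySem.Set.len (PySem.Set.inter prefixes pvPOSITIVE) ≠ 0 then "confirm"
    else if PySem.Set.len (PySem.Set.inter prefixes pvNEGATIVE) ≠ 0 then "deny"
    else "unknown"


-- ===== PRECONDITION & SPEC =====
def Spec_parse_confirmation (value : String) (out : String) : Prop := out = parse_confirmation_alt value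
instance (value : String) (out : String) : Decidable (Spec_parse_confirmation value out) := by unfold Spec_parse_confirmation; infer_instance

-- ===== CLAIM (what is proved, stated in full; the proofs are below) =====
def Claim_equal_parse_confirmation : Prop := ∀ (value : String), Dom_parse_confirmation value → Spec_parse_confirmation value (parse_confirmation value)

-- ===== LEMMAS AND PROOFS =====

def pvGood (ws : List (List Char)) : Prop :=
  ∀ w ∈ ws, w ≠ [] ∧ ∀ c ∈ w, PySem.Chars.isspace c = false

lemma pv_split_go_good (s cur : List Char) (acc : List (List Char))
    (hc : ∀ c ∈ cur, PySem.Chars.isspace c = false)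
    (ha : pvGood acc) : pvGood (PySem.Chars.split₀.go s cur acc) := by
  induction s generalizing cur acc with
  | nil =>
    simp only [PySem.Chars.split₀.go]
    split
    · exact fun w hw => ha w (by simpa using hw)
    · intro w hw
      rename_i hcur
      simp at hw
      rcases hw with h | h
      · exact ha w h
      · subst h
        refine ⟨?_, fun c hc' => hc c (by simpa using hc')⟩
        simp [List.isEmpty_iff] at hcur
        simpa using fun h => hcur (by simpa using congrArg List.reverse h)
  | cons c rest ih =>
    simp only [PySem.Chars.split₀.go]
    split
    · split
      · exact ih [] acc (by simp) ha
      · rename_i hsp hcur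
        refine ih [] _ (by simp) ?_
        intro w hw
        rcases List.mem_cons.1 hw with h | h
        · subst h
          refine ⟨?_, fun d hd => hc d (by simpa using hd)⟩
          simp [List.isEmpty_iff] at hcur
          simpa using fun h => hcur (by simpa using congrArg List.reverse h)
        · exact ha w h
    · rename_i hsp
      refine ih (c :: cur) acc ?_ ha
      intro d hd
      rcases List.mem_cons.1 hd with h | h
      · subst h; simpa using hsp
      · exact hc d h

lemma pv_split_good (s : List Char) : pvGood (PySem.Chars.split₀ s) :=
  pv_split_go_good s [] [] (by simp) (by simp [pvGood])

lemma pv_space_notMem {w : List Char} (h : ∀ c ∈ w, PySem.Chars.isspace c = false) : ' ' ∉ w := by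
  intro hmem
  have := h ' ' hmem
  simp [PySem.Chars.isspace] at this

lemma pv_join_nil_iff {ws : List (List Char)} (h : pvGood ws) :
    PySem.Chars.join [' '] ws = [] ↔ ws = [] := by
  cases ws with
  | nil => simp [PySem.Chars.join_nil]
  | cons w rest =>
    have hne : PySem.Chars.join [' '] (w :: rest) ≠ [] := by
      intro hj
      cases rest with
      | nil =>
        rw [PySem.Chars.join_singleton] at hj
        exact (h w (by simp)).1 hj
      | cons b r =>
        rw [PySem.Chars.join_cons_cons] at hj
        simp at hj
    simp [hne]

lemma pv_app_space_eq {a b x y : List Char} (ha : ' ' ∉ a) (hb : ' ' ∉ b) :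
    a ++ ' ' :: x = b ++ ' ' :: y ↔ a = b ∧ x = y := by
  constructor
  · intro h
    induction a generalizing b with
    | nil =>
      cases b with
      | nil => simpa using h
      | cons c bs =>
        simp at h
        exact absurd (h.1 ▸ List.mem_cons_self) hb
    | cons c as ih =>
      cases b with
      | nil =>
        simp at h
        exact absurd (h.1 ▸ List.mem_cons_self) ha
      | cons d bs =>
        simp at h
        obtain ⟨rfl, h2⟩ := h
        have := ih (fun hm => ha (List.mem_cons_of_mem _ hm)) (fun hm => hb (List.mem_cons_of_mem _ hm)) h2
        simpa using this
  · rintro ⟨rfl, rfl⟩; rfl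

lemma pv_app_space_prefix {a b x y : List Char} (ha : ' ' ∉ a) (hb : ' ' ∉ b) :
    (a ++ ' ' :: x) <+: (b ++ ' ' :: y) ↔ a = b ∧ x <+: y := by
  constructor
  · rintro ⟨t, ht⟩
    have ht' : a ++ ' ' :: (x ++ t) = b ++ ' ' :: y := by simpa using ht
    obtain ⟨rfl, h2⟩ := (pv_app_space_eq ha hb).1 ht'
    exact ⟨rfl, t, h2⟩
  · rintro ⟨rfl, t, rfl⟩
    exact ⟨t, by simp⟩

lemma pv_good_tail {a : List Char} {l : List (List Char)} (h : pvGood (a :: l)) : pvGood l :=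
  fun w hw => h w (List.mem_cons_of_mem _ hw)

lemma pv_good_head {a : List Char} {l : List (List Char)} (h : pvGood (a :: l)) :
    a ≠ [] ∧ ' ' ∉ a :=
  ⟨(h a List.mem_cons_self).1, pv_space_notMem (h a List.mem_cons_self).2⟩

lemma pv_no_space_pre {a x w : List Char} (hw : ' ' ∉ w) : ¬ (a ++ ' ' :: x) <+: w := by
  rintro ⟨r, hr⟩
  exact hw (by rw [← hr]; simp)

lemma pv_ne_of_no_space {a x t : List Char} (ht : ' ' ∉ t) : a ++ ' ' :: x ≠ t := by
  intro h
  exact ht (h ▸ by simp)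

lemma pv_key (tws : List (List Char)) (hne : tws ≠ []) (htg : pvGood tws)
    (ws : List (List Char)) (hg : pvGood ws) :
    (PySem.Chars.join [' '] ws = PySem.Chars.join [' '] tws ∨
      (PySem.Chars.join [' '] tws ++ [' ']) <+: PySem.Chars.join [' '] ws) ↔ tws <+: ws := by
  induction tws generalizing ws with
  | nil => exact absurd rfl hne
  | cons t tws' ih =>
    obtain ⟨ht1, ht2⟩ := pv_good_head htg
    cases ws with
    | nil =>
      have hJ : PySem.Chars.join [' '] (t :: tws') ≠ [] :=
        fun h => (List.cons_ne_nil t tws') ((pv_join_nil_iff htg).1 h)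
      simp only [PySem.Chars.join_nil]
      constructor
      · rintro (h | ⟨r, hr⟩)
        · exact absurd h.symm hJ
        · simp at hr
      · intro h
        exact absurd (List.eq_nil_of_prefix_nil h) (List.cons_ne_nil t tws')
    | cons w ws' =>
      obtain ⟨hw1, hw2⟩ := pv_good_head hg
      cases tws' with
      | nil =>
        cases ws' with
        | nil =>
          rw [PySem.Chars.join_singleton, PySem.Chars.join_singleton]
          simp only [List.cons_prefix_cons, List.prefix_refl, and_true]
          constructor
          · rintro (h | h)
            · exact h.symm
            · exact absurd h (by simpa using pv_no_space_pre (x := []) hw2)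
          · rintro rfl; exact Or.inl rfl
        | cons w2 wr =>
          rw [PySem.Chars.join_singleton, PySem.Chars.join_cons_cons]
          have heq : w ++ [' '] ++ PySem.Chars.join [' '] (w2 :: wr) =
              w ++ ' ' :: PySem.Chars.join [' '] (w2 :: wr) := by simp
          rw [heq]
          constructor
          · rintro (h | h)
            · exact absurd h (pv_ne_of_no_space ht2)
            · have h' : (t ++ ' ' :: []) <+: (w ++ ' ' :: PySem.Chars.join [' '] (w2 :: wr)) := h
              obtain ⟨rfl, -⟩ := (pv_app_space_prefix ht2 hw2).1 h'
              simp
          · intro h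
            obtain ⟨rfl, -⟩ := List.cons_prefix_cons.1 h
            refine Or.inr ?_
            exact (pv_app_space_prefix ht2 ht2).2 ⟨rfl, List.nil_prefix⟩
      | cons t2 tr =>
        rw [PySem.Chars.join_cons_cons]
        have heqt : t ++ [' '] ++ PySem.Chars.join [' '] (t2 :: tr) =
            t ++ ' ' :: PySem.Chars.join [' '] (t2 :: tr) := by simp
        rw [heqt]
        cases ws' with
        | nil =>
          rw [PySem.Chars.join_singleton]
          constructor
          · rintro (h | h)
            · exact absurd h.symm (pv_ne_of_no_space hw2)
            · exact absurd (by simpa using h) (pv_no_space_pre hw2)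
          · intro h
            obtain ⟨-, h2⟩ := List.cons_prefix_cons.1 h
            exact absurd h2 (by simp)
        | cons w2 wr =>
          rw [PySem.Chars.join_cons_cons]
          have heqw : w ++ [' '] ++ PySem.Chars.join [' '] (w2 :: wr) =
              w ++ ' ' :: PySem.Chars.join [' '] (w2 :: wr) := by simp
          rw [heqw]
          have hpre : ((t ++ ' ' :: PySem.Chars.join [' '] (t2 :: tr)) ++ [' ']) =
              t ++ ' ' :: (PySem.Chars.join [' '] (t2 :: tr) ++ [' ']) := by simp
          rw [hpre]
          rw [pv_app_space_eq hw2 ht2, pv_app_space_prefix ht2 hw2, List.cons_prefix_cons]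
          have hih := ih (by simp) (pv_good_tail htg) (w2 :: wr) (pv_good_tail hg)
          constructor
          · rintro (⟨rfl, h2⟩ | ⟨rfl, h2⟩)
            · exact ⟨rfl, hih.1 (Or.inl h2)⟩
            · exact ⟨rfl, hih.1 (Or.inr h2)⟩
          · rintro ⟨rfl, h2⟩
            rcases hih.2 h2 with h | h
            · exact Or.inl ⟨rfl, h⟩
            · exact Or.inr ⟨rfl, h⟩

lemma pv_join_inj {ws ts : List (List Char)} (hg : pvGood ws) (ht : pvGood ts)
    (h : PySem.Chars.join [' '] ws = PySem.Chars.join [' '] ts) : ws = ts := by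
  rcases eq_or_ne ts [] with rfl | hne
  · exact (pv_join_nil_iff hg).1 (by simpa [PySem.Chars.join_nil] using h)
  · rcases eq_or_ne ws [] with rfl | hwne
    · exact absurd ((pv_join_nil_iff ht).1 (by simpa [PySem.Chars.join_nil] using h.symm)) hne
    · have h1 : ts <+: ws := (pv_key ts hne ht ws hg).1 (Or.inl h)
      have h2 : ws <+: ts := (pv_key ws hwne hg ts ht).1 (Or.inl h.symm)
      exact (h2.eq_of_length_le h1.length_le)

lemma pv_cond_iff (ws : List String) (hg : pvGood (ws.map String.toList)) (tok : String)
    (hj : PySem.Chars.join [' '] (PySem.Chars.split₀ tok.toList) = tok.toList)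
    (htne : PySem.Chars.split₀ tok.toList ≠ []) :
    ((PySem.Str.join " " ws == tok || PySem.Str.startswith (PySem.Str.join " " ws) (tok ++ " ")) = true)
    ↔ tok ∈ (PySem.List.pyRange 1 ((ws.length : Int) + 1) 1).map
        (fun i => PySem.Str.join " " (PySem.List.slice ws none (some i))) := by
  have htg : pvGood (PySem.Chars.split₀ tok.toList) := pv_split_good _
  have hL : ((PySem.Str.join " " ws == tok ||
      PySem.Str.startswith (PySem.Str.join " " ws) (tok ++ " ")) = true)
      ↔ (PySem.Chars.split₀ tok.toList) <+: ws.map String.toList := by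
    rw [← pv_key _ htne htg _ hg]
    have h1 : (PySem.Str.join " " ws == tok) = true ↔
        PySem.Chars.join [' '] (ws.map String.toList) =
          PySem.Chars.join [' '] (PySem.Chars.split₀ tok.toList) := by
      rw [hj]
      constructor
      · intro h
        have : PySem.Str.join " " ws = tok := by simpa using h
        simpa [PySem.Str.join] using congrArg String.toList this
      · intro h
        have : PySem.Str.join " " ws = tok := by
          apply String.ext
          simpa [PySem.Str.join] using h
        simp [this]
    have h2 : (PySem.Str.startswith (PySem.Str.join " " ws) (tok ++ " ")) = true ↔
        (PySem.Chars.join [' '] (PySem.Chars.split₀ tok.toList) ++ [' ']) <+: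
          PySem.Chars.join [' '] (ws.map String.toList) := by
      rw [hj]
      rw [PySem.Str.startswith]
      rw [PySem.Chars.startswith_iff]
      simp [PySem.Str.join]
    simp only [Bool.or_eq_true, h1, h2]
  rw [hL]
  constructor
  · intro hpre
    have hlen : 1 ≤ (PySem.Chars.split₀ tok.toList).length := by
      cases h : PySem.Chars.split₀ tok.toList with
      | nil => exact absurd h htne
      | cons a l => simp
    have hlen2 : (PySem.Chars.split₀ tok.toList).length ≤ ws.length := by
      simpa using hpre.length_le
    refine List.mem_map.2 ⟨((PySem.Chars.split₀ tok.toList).length : Int), ?_, ?_⟩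
    · rw [PySem.List.mem_pyRange_one]
      omega
    · rw [PySem.List.slice_to _ (Int.natCast_nonneg _)]
      have htake : (ws.map String.toList).take (PySem.Chars.split₀ tok.toList).length =
          PySem.Chars.split₀ tok.toList := (List.prefix_iff_eq_take.1 hpre).symm
      apply String.ext
      have : (ws.take (PySem.Chars.split₀ tok.toList).length).map String.toList =
          PySem.Chars.split₀ tok.toList := by
        rw [List.map_take]; exact_mod_cast htake
      simp only [PySem.Str.join, String.ofList]
      simp [this, hj]
  · intro hmem
    obtain ⟨i, hi, heq⟩ := List.mem_map.1 hmem
    rw [PySem.List.mem_pyRange_one] at hi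
    rw [PySem.List.slice_to _ (by omega)] at heq
    have heqC : PySem.Chars.join [' '] ((ws.take i.toNat).map String.toList) =
        PySem.Chars.join [' '] (PySem.Chars.split₀ tok.toList) := by
      rw [hj]
      simpa [PySem.Str.join] using congrArg String.toList heq
    have hgood : pvGood ((ws.take i.toNat).map String.toList) := by
      intro w hw
      rw [List.map_take] at hw
      exact hg w (List.mem_of_mem_take hw)
    have := pv_join_inj hgood htg heqC
    rw [← this, List.map_take]
    exact List.take_prefix _ _

lemma pv_side_iff (ws : List String) (hg : pvGood (ws.map String.toList)) (toks : List String)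
    (hd : toks.all (fun tok =>
      PySem.Chars.join [' '] (PySem.Chars.split₀ tok.toList) == tok.toList &&
      !(PySem.Chars.split₀ tok.toList).isEmpty) = true) :
    (toks.any (fun token => PySem.Str.join " " ws == token ||
        PySem.Str.startswith (PySem.Str.join " " ws) (token ++ " ")) = true)
    ↔ PySem.Set.len (PySem.Set.inter
        (PySem.Set.ofList ((PySem.List.pyRange 1 ((ws.length : Int) + 1) 1).map
          (fun i => PySem.Str.join " " (PySem.List.slice ws none (some i)))))
        (PySem.Set.ofList toks)) ≠ 0 := by
  have hd' : ∀ tok ∈ toks, PySem.Chars.join [' '] (PySem.Chars.split₀ tok.toList) = tok.toList ∧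
      PySem.Chars.split₀ tok.toList ≠ [] := by
    intro tok htok
    have h := List.all_eq_true.1 hd tok htok
    simp only [Bool.and_eq_true, beq_iff_eq, Bool.not_eq_true', List.isEmpty_eq_false_iff] at h
    exact h
  rw [List.any_eq_true]
  have hlen : PySem.Set.len (PySem.Set.inter
        (PySem.Set.ofList ((PySem.List.pyRange 1 ((ws.length : Int) + 1) 1).map
          (fun i => PySem.Str.join " " (PySem.List.slice ws none (some i)))))
        (PySem.Set.ofList toks)) ≠ 0 ↔
      ∃ tok, tok ∈ PySem.Set.inter
        (PySem.Set.ofList ((PySem.List.pyRange 1 ((ws.length : Int) + 1) 1).map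
          (fun i => PySem.Str.join " " (PySem.List.slice ws none (some i)))))
        (PySem.Set.ofList toks) := by
    rw [PySem.Set.len]
    simp only [ne_eq, Nat.cast_eq_zero]
    constructor
    · intro h
      have hne : PySem.Set.inter
          (PySem.Set.ofList ((PySem.List.pyRange 1 ((ws.length : Int) + 1) 1).map
            (fun i => PySem.Str.join " " (PySem.List.slice ws none (some i)))))
          (PySem.Set.ofList toks) ≠ [] := fun hnil => h (by simp [hnil])
      exact List.exists_mem_of_ne_nil _ hne
    · rintro ⟨x, hx⟩ hlen0
      rw [List.length_eq_zero_iff] at hlen0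
      simp [hlen0] at hx
  rw [hlen]
  constructor
  · rintro ⟨tok, htok, hc⟩
    refine ⟨tok, (PySem.Set.mem_inter _ _ _).2 ⟨(PySem.Set.mem_ofList _ _).2 ?_, (PySem.Set.mem_ofList _ _).2 htok⟩⟩
    exact (pv_cond_iff ws hg tok (hd' tok htok).1 (hd' tok htok).2).1 hc
  · rintro ⟨tok, hin⟩
    obtain ⟨h1, h2⟩ := (PySem.Set.mem_inter _ _ _).1 hin
    have htok := (PySem.Set.mem_ofList _ _).1 h2
    refine ⟨tok, htok, ?_⟩
    exact (pv_cond_iff ws hg tok (hd' tok htok).1 (hd' tok htok).2).2 ((PySem.Set.mem_ofList _ _).1 h1)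

set_option maxHeartbeats 2000000 in
theorem pv_main (value : String) : parse_confirmation value = parse_confirmation_alt value := by
  have hmap : (PySem.Str.split₀ (PySem.Str.lower (PySem.Str.strip value))).map String.toList =
      PySem.Chars.split₀ (PySem.Str.lower (PySem.Str.strip value)).toList := by
    simp
  have hgood : pvGood ((PySem.Str.split₀ (PySem.Str.lower (PySem.Str.strip value))).map String.toList) := by
    rw [hmap]; exact pv_split_good _
  unfold parse_confirmation parse_confirmation_alt pvNormalizeText
  by_cases h0 : PySem.Str.split₀ (PySem.Str.lower (PySem.Str.strip value)) = []
  · rw [h0]; decide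
  · have hEmpty : (PySem.Str.split₀ (PySem.Str.lower (PySem.Str.strip value))).isEmpty = false := by
      simp [h0]
    have htext : (PySem.Str.join " " (PySem.Str.split₀ (PySem.Str.lower (PySem.Str.strip value))) == "") = false := by
      rw [beq_eq_false_iff_ne]
      intro h
      have h2 : PySem.Chars.join [' '] ((PySem.Str.split₀ (PySem.Str.lower (PySem.Str.strip value))).map String.toList) = [] := by
        simpa [PySem.Str.join] using congrArg String.toList h
      exact h0 (List.map_eq_nil_iff.1 ((pv_join_nil_iff hgood).1 h2))
    have hpos := pv_side_iff _ hgood pvPositiveA (by decide)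
    have hneg := pv_side_iff _ hgood pvNegativeA (by decide)
    have hPdef : pvPOSITIVE = PySem.Set.ofList pvPositiveA := rfl
    have hNdef : pvNEGATIVE = PySem.Set.ofList pvNegativeA := rfl
    rw [hPdef, hNdef]
    simp only [htext, hEmpty, Bool.false_eq_true, if_false]
    by_cases hp : pvPositiveA.any (fun token =>
        PySem.Str.join " " (PySem.Str.split₀ (PySem.Str.lower (PySem.Str.strip value))) == token ||
        PySem.Str.startswith (PySem.Str.join " " (PySem.Str.split₀ (PySem.Str.lower (PySem.Str.strip value)))) (token ++ " ")) = true
    · rw [if_pos hp, if_pos (hpos.1 hp)]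
    · rw [if_neg (by simpa using hp), if_neg (fun hc => hp (hpos.2 hc))]
      by_cases hn : pvNegativeA.any (fun token =>
          PySem.Str.join " " (PySem.Str.split₀ (PySem.Str.lower (PySem.Str.strip value))) == token ||
          PySem.Str.startswith (PySem.Str.join " " (PySem.Str.split₀ (PySem.Str.lower (PySem.Str.strip value)))) (token ++ " ")) = true
      · rw [if_pos hn, if_pos (hneg.1 hn)]
      · rw [if_neg (by simpa using hn), if_neg (fun hc => hn (hneg.2 hc))]

-- ===== VERDICT (by name: the statement is the Claim_ definition above) =====
theorem parse_confirmation_spec : Claim_equal_parse_confirmation := by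
  intro value _
  unfold Spec_parse_confirmation
  exact pv_main value
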